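-- pv_equiv track=rewrite | github.com/mkXultra/mew | src/mew/implement_lane/hot_path_step_diff.py | _shell_redirection_targets
-- ===== SOURCE A (Python) =====
-- def _shell_redirection_targets(command: str) -> list[str]:
--     targets: list[str] = []
--     index = 0
--     quote = ""
--     escaped = False
--     while index < len(command):
--         char = command[index]
--         if escaped:
--             escaped = False
--             index += 1
--             continue
--         if quote:
--             if char == "\\" and quote == '"':
--                 escaped = True
--             elif char == quote:
--                 quote = ""
--             index += 1
--             continue
--         if char == "\\":
--             escaped = True
--             index += 1
--             continue
--         if char in {"'", '"'}:
--             quote = char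
--             index += 1
--             continue
--         if char != ">":
--             index += 1
--             continue
--
--         run_end = index
--         while run_end < len(command) and command[run_end] == ">":
--             run_end += 1
--         redirection_width = run_end - index
--         next_char = command[run_end] if run_end < len(command) else ""
--         if redirection_width > 2 or next_char == "=":
--             index = run_end
--             continue
--         target_start = run_end
--         while target_start < len(command) and command[target_start].isspace():
--             target_start += 1
--         if target_start < len(command) and command[target_start] == "&":
--             index = target_start + 1
--             continue
--         target, index = _read_shell_word(command, target_start)
--         if target:
--             targets.append(target)
--     return targets
--
-- def _read_shell_word(command: str, start: int) -> tuple[str, int]: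
--     index = start
--     while index < len(command) and command[index].isspace():
--         index += 1
--     chars: list[str] = []
--     quote = ""
--     escaped = False
--     while index < len(command):
--         char = command[index]
--         if escaped:
--             chars.append(char)
--             escaped = False
--             index += 1
--             continue
--         if quote:
--             if char == "\\" and quote == '"':
--                 escaped = True
--             elif char == quote:
--                 quote = ""
--             else:
--                 chars.append(char)
--             index += 1
--             continue
--         if char == "\\":
--             escaped = True
--             index += 1
--             continue
--         if char in {"'", '"'}:
--             quote = char
--             index += 1
--             continue
--         if char.isspace() or char in {";", "|", "&", "<", ">", "(", ")"}:
--             break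
--         chars.append(char)
--         index += 1
--     return "".join(chars), index
-- ===== SOURCE B (Python) =====
-- def _shell_redirection_targets(command: str) -> list[str]:
--     # Single left-to-right state machine over the characters: no index jumps,
--     # no re-scanning helper.  States:
--     #   ('n', quote, escaped)      -- normal scanning
--     #   ('g', width)               -- inside a run of '>'
--     #   ('s',)                     -- skipping whitespace before a target
--     #   ('w', buf, quote, escaped) -- reading the target word
--     targets: list[str] = []
--     state = ('n', '', False)
--
--     def normal(c):
--         # transition from a fresh normal state on character c
--         if c == '\\':
--             return ('n', '', True)
--         if c in ("'", '"'):
--             return ('n', c, False)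
--         if c == '>':
--             return ('g', 1)
--         return ('n', '', False)
--
--     def word(buf, quote, escaped, c):
--         # one step of target-word reading; may emit the finished word
--         if escaped:
--             return ('w', buf + c, quote, False)
--         if quote:
--             if c == '\\' and quote == '"':
--                 return ('w', buf, quote, True)
--             if c == quote:
--                 return ('w', buf, '', False)
--             return ('w', buf + c, quote, False)
--         if c == '\\':
--             return ('w', buf, '', True)
--         if c in ("'", '"'):
--             return ('w', buf, c, False)
--         if c.isspace() or c in {";", "|", "&", "<", ">", "(", ")"}:
--             if buf:
--                 targets.append(buf)
--             return normal(c)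
--         return ('w', buf + c, quote, False)
--
--     for c in command:
--         kind = state[0]
--         if kind == 'n':
--             _, quote, escaped = state
--             if escaped:
--                 state = ('n', quote, False)
--             elif quote:
--                 if c == '\\' and quote == '"':
--                     state = ('n', quote, True)
--                 elif c == quote:
--                     state = ('n', '', False)
--                 else:
--                     state = ('n', quote, False)
--             else:
--                 state = normal(c)
--         elif kind == 'g':
--             width = state[1]
--             if c == '>':
--                 state = ('g', width + 1)
--             elif width > 2 or c == '=':
--                 state = normal(c)
--             elif c.isspace():
--                 state = ('s',)
--             elif c == '&':
--                 state = ('n', '', False)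
--             else:
--                 state = word('', '', False, c)
--         elif kind == 's':
--             if c.isspace():
--                 state = ('s',)
--             elif c == '&':
--                 state = ('n', '', False)
--             else:
--                 state = word('', '', False, c)
--         else:  # 'w'
--             state = word(state[1], state[2], state[3], c)
--
--     if state[0] == 'w' and state[1]:
--         targets.append(state[1])
--     return targets
-- ===== Notes on version B (the rewrite author's own statement) =====
-- stated objective: alternative
-- what changed: A scans with an index-jumping while loop that re-scans the redirection run, the whitespace skip and the target word via a separate _read_shell_word helper; B is a single left-to-right pass over the characters driven by an explicit four-state machine (normal / redirection-run / skip-whitespace / word) that never moves an index backwards or re-reads a character.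
import Mathlib
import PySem

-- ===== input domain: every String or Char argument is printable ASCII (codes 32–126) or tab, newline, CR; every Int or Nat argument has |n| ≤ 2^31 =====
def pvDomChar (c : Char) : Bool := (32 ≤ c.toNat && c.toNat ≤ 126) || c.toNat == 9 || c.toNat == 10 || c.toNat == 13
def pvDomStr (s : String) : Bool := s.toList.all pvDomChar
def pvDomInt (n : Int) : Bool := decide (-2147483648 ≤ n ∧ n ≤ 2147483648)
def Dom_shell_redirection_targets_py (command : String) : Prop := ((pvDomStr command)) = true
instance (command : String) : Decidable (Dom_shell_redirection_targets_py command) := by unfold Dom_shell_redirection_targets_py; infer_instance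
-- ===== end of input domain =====

-- B re-implements A's index-jumping scanner as a single-pass character state machine
-- (alternative decomposition, same O(n) cost); return values proved equal on all of Dom.

-- ===== PORT A =====
-- measure fact cited by every loop below (keeps the termination proof terms small)
theorem dec_step {len i : Nat} (h : i < len) : len - (i+1) < len - i := by omega

-- inner loop: while run_end < len(command) and command[run_end] == ">"
def runWhileGt (cs : List Char) (j : Nat) : Nat :=
  if h : j < cs.length then
    if cs[j] = '>' then runWhileGt cs (j+1) else j
  else j
termination_by cs.length - j
decreasing_by exact dec_step h

-- inner loop: while … and command[k].isspace()
def skipWs (cs : List Char) (j : Nat) : Nat :=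
  if h : j < cs.length then
    if PySem.Chars.isspace cs[j] then skipWs cs (j+1) else j
  else j
termination_by cs.length - j
decreasing_by exact dec_step h

-- _read_shell_word's main while loop (quote "" ↦ none)
def readWordLoop (cs : List Char) (i : Nat) (chars : List Char) (quote : Option Char) (escaped : Bool) : List Char × Nat :=
  if h : i < cs.length then
    if escaped then readWordLoop cs (i+1) (chars ++ [cs[i]]) quote false
    else if quote.isSome then
      if cs[i] = '\\' ∧ quote = some '"' then readWordLoop cs (i+1) chars quote true
      else if some cs[i] = quote then readWordLoop cs (i+1) chars none false
      else readWordLoop cs (i+1) (chars ++ [cs[i]]) quote false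
    else if cs[i] = '\\' then readWordLoop cs (i+1) chars none true
    else if cs[i] = '\'' ∨ cs[i] = '"' then readWordLoop cs (i+1) chars (some cs[i]) false
    else if PySem.Chars.isspace cs[i] ∨ cs[i] ∈ [';', '|', '&', '<', '>', '(', ')'] then (chars, i)
    else readWordLoop cs (i+1) (chars ++ [cs[i]]) quote false
  else (chars, i)
termination_by cs.length - i
decreasing_by all_goals exact dec_step h

def read_shell_word (cs : List Char) (start : Nat) : List Char × Nat :=
  readWordLoop cs (skipWs cs start) [] none false

theorem runWhileGt_ge (cs : List Char) (j : Nat) : j ≤ runWhileGt cs j := by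
  induction j using runWhileGt.induct cs with
  | case1 j h hc ih => rw [runWhileGt]; simp [h, hc]; omega
  | case2 j h hc => rw [runWhileGt]; simp [h, hc]
  | case3 j h => rw [runWhileGt]; simp [h]

theorem runWhileGt_lt_of (cs : List Char) (i : Nat) (h : i < cs.length) (hc : cs[i] = '>') :
    i < runWhileGt cs i := by
  have h1 : runWhileGt cs i = runWhileGt cs (i+1) := by rw [runWhileGt]; simp [h, hc]
  have := runWhileGt_ge cs (i+1)
  omega

theorem skipWs_ge (cs : List Char) (j : Nat) : j ≤ skipWs cs j := by
  induction j using skipWs.induct cs with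
  | case1 j h hc ih => rw [skipWs]; simp [h, hc]; omega
  | case2 j h hc => rw [skipWs]; simp [h, hc]
  | case3 j h => rw [skipWs]; simp [h]

theorem readWordLoop_ge (cs : List Char) : ∀ (n i : Nat) (chars : List Char) (quote : Option Char) (escaped : Bool),
    cs.length - i ≤ n → i ≤ (readWordLoop cs i chars quote escaped).2
  | n, i, chars, quote, escaped, hn => by
    rw [readWordLoop]
    split
    · have hlt : i < cs.length := by assumption
      have step : ∀ (ch : List Char) (Q : Option Char) (E : Bool), i ≤ (readWordLoop cs (i+1) ch Q E).2 := by
        intro ch Q E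
        match n with
        | 0 => omega
        | n+1 => exact le_trans (Nat.le_succ i) (readWordLoop_ge cs n (i+1) ch Q E (by omega))
      all_goals repeat (first | exact step _ _ _ | exact Nat.le_refl i | split)
    · simp

theorem read_shell_word_ge (cs : List Char) (start : Nat) : start ≤ (read_shell_word cs start).2 := by
  have h1 := skipWs_ge cs start
  have h2 := readWordLoop_ge cs cs.length (skipWs cs start) [] none false (by omega)
  unfold read_shell_word; omega

-- measure facts for the index jumps of A's main loop
theorem dec_run (cs : List Char) (i : Nat) (h : i < cs.length) (hc : cs[i] = '>') :
    cs.length - runWhileGt cs i < cs.length - i := by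
  have := runWhileGt_lt_of cs i h hc
  omega

theorem dec_amp (cs : List Char) (i : Nat) (h : i < cs.length) (hc : cs[i] = '>') :
    cs.length - (skipWs cs (runWhileGt cs i) + 1) < cs.length - i := by
  have h1 := runWhileGt_lt_of cs i h hc
  have h2 := skipWs_ge cs (runWhileGt cs i)
  omega

theorem dec_word (cs : List Char) (i : Nat) (h : i < cs.length) (hc : cs[i] = '>') :
    cs.length - (read_shell_word cs (skipWs cs (runWhileGt cs i))).2 < cs.length - i := by
  have h1 := runWhileGt_lt_of cs i h hc
  have h2 := skipWs_ge cs (runWhileGt cs i)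
  have h3 := read_shell_word_ge cs (skipWs cs (runWhileGt cs i))
  omega

-- A's main while loop
def loopA (cs : List Char) (i : Nat) (quote : Option Char) (escaped : Bool) (targets : List String) : List String :=
  if h : i < cs.length then
    if escaped then loopA cs (i+1) quote false targets
    else if quote.isSome then
      if cs[i] = '\\' ∧ quote = some '"' then loopA cs (i+1) quote true targets
      else if some cs[i] = quote then loopA cs (i+1) none false targets
      else loopA cs (i+1) quote false targets
    else if cs[i] = '\\' then loopA cs (i+1) quote true targets
    else if cs[i] = '\'' ∨ cs[i] = '"' then loopA cs (i+1) (some cs[i]) false targets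
    else if hne : cs[i] ≠ '>' then loopA cs (i+1) quote escaped targets
    else
      -- run_end := runWhileGt cs i ; next_char := cs[run_end] if in range else none
      if 2 < runWhileGt cs i - i ∨ (if hr : runWhileGt cs i < cs.length then some cs[runWhileGt cs i] else none) = some '=' then
        loopA cs (runWhileGt cs i) quote escaped targets
      else
        -- target_start := skipWs cs run_end
        if h2 : skipWs cs (runWhileGt cs i) < cs.length ∧ cs[skipWs cs (runWhileGt cs i)]? = some '&' then
          loopA cs (skipWs cs (runWhileGt cs i) + 1) quote escaped targets
        else
          -- (target, index) := _read_shell_word(command, target_start)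
          if (read_shell_word cs (skipWs cs (runWhileGt cs i))).1 ≠ [] then
            loopA cs (read_shell_word cs (skipWs cs (runWhileGt cs i))).2 quote escaped
              (targets ++ [String.ofList (read_shell_word cs (skipWs cs (runWhileGt cs i))).1])
          else loopA cs (read_shell_word cs (skipWs cs (runWhileGt cs i))).2 quote escaped targets
  else targets
termination_by cs.length - i
decreasing_by
all_goals first
  | exact dec_step h
  | exact dec_run cs i h (not_not.mp hne)
  | exact dec_amp cs i h (not_not.mp hne)
  | exact dec_word cs i h (not_not.mp hne)

def shell_redirection_targets_py (command : String) : List String :=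
  loopA command.toList 0 none false []

-- ===== PORT B =====
inductive BState where
  | norm (quote : Option Char) (escaped : Bool)
  | gt (width : Nat)
  | skip
  | word (buf : List Char) (quote : Option Char) (escaped : Bool)
deriving DecidableEq, Repr

-- Source B's `normal(c)`: transition from a fresh normal state
def normalB (c : Char) : BState :=
  if c = '\\' then .norm none true
  else if c = '\'' ∨ c = '"' then .norm (some c) false
  else if c = '>' then .gt 1
  else .norm none false

-- Source B's `word(...)`: one step of target-word reading, possibly emitting the word
def wordB (buf : List Char) (quote : Option Char) (escaped : Bool) (c : Char) : BState × List String :=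
  if escaped then (.word (buf ++ [c]) quote false, [])
  else if quote.isSome then
    if c = '\\' ∧ quote = some '"' then (.word buf quote true, [])
    else if some c = quote then (.word buf none false, [])
    else (.word (buf ++ [c]) quote false, [])
  else if c = '\\' then (.word buf none true, [])
  else if c = '\'' ∨ c = '"' then (.word buf (some c) false, [])
  else if PySem.Chars.isspace c ∨ c ∈ [';', '|', '&', '<', '>', '(', ')'] then
    (normalB c, if buf ≠ [] then [String.ofList buf] else [])
  else (.word (buf ++ [c]) quote false, [])

-- Source B's loop body
def stepB (st : BState) (targets : List String) (c : Char) : BState × List String :=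
  match st with
  | .norm quote escaped =>
    if escaped then (.norm quote false, targets)
    else if quote.isSome then
      if c = '\\' ∧ quote = some '"' then (.norm quote true, targets)
      else if some c = quote then (.norm none false, targets)
      else (.norm quote false, targets)
    else (normalB c, targets)
  | .gt width =>
    if c = '>' then (.gt (width + 1), targets)
    else if 2 < width ∨ c = '=' then (normalB c, targets)
    else if PySem.Chars.isspace c then (.skip, targets)
    else if c = '&' then (.norm none false, targets)
    else
      let p := wordB [] none false c
      (p.1, targets ++ p.2)
  | .skip =>
    if PySem.Chars.isspace c then (.skip, targets)
    else if c = '&' then (.norm none false, targets)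
    else
      let p := wordB [] none false c
      (p.1, targets ++ p.2)
  | .word buf quote escaped =>
    let p := wordB buf quote escaped c
    (p.1, targets ++ p.2)

-- Source B's for-loop over the characters, plus the final flush
def runB (st : BState) (l : List Char) (targets : List String) : List String :=
  match l with
  | [] =>
    match st with
    | .word buf _ _ => if buf ≠ [] then targets ++ [String.ofList buf] else targets
    | _ => targets
  | c :: rest =>
    let p := stepB st targets c
    runB p.1 rest p.2

def shell_redirection_targets_py_alt (command : String) : List String :=
  runB (.norm none false) command.toList []

-- ===== PRECONDITION & SPEC =====
def Spec_shell_redirection_targets_py (command : String) (out : List String) : Prop := out = shell_redirection_targets_py_alt command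
instance (command : String) (out : List String) : Decidable (Spec_shell_redirection_targets_py command out) := by unfold Spec_shell_redirection_targets_py; infer_instance

-- ===== CLAIM (what is proved, stated in full; the proofs are below) =====
def Claim_equal_shell_redirection_targets_py : Prop := ∀ (command : String), Dom_shell_redirection_targets_py command → Spec_shell_redirection_targets_py command (shell_redirection_targets_py command)

-- ===== LEMMAS AND PROOFS =====

-- simple unfolding facts about A's inner loops
theorem runWhileGt_succ (cs : List Char) (i : Nat) (h : i < cs.length) (hc : cs[i] = '>') :
    runWhileGt cs i = runWhileGt cs (i+1) := by
  rw [runWhileGt]; simp [h, hc]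

theorem runWhileGt_stop (cs : List Char) (i : Nat) :
    runWhileGt cs i < cs.length → cs[runWhileGt cs i]? ≠ some '>' := by
  induction i using runWhileGt.induct cs with
  | case1 j h hc ih => rw [runWhileGt_succ cs j h hc]; exact ih
  | case2 j h hc =>
    have he : runWhileGt cs j = j := by rw [runWhileGt]; simp [h, hc]
    rw [he]; intro _; simp [List.getElem?_eq_getElem h, hc]
  | case3 j h =>
    have he : runWhileGt cs j = j := by rw [runWhileGt]; simp [h]
    rw [he]; intro hlt; omega

theorem skipWs_succ (cs : List Char) (i : Nat) (h : i < cs.length) (hc : PySem.Chars.isspace cs[i]) :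
    skipWs cs i = skipWs cs (i+1) := by
  rw [skipWs]; simp [h, hc]

theorem skipWs_eq_self (cs : List Char) (i : Nat)
    (h : ∀ _hlt : i < cs.length, PySem.Chars.isspace cs[i] = false) : skipWs cs i = i := by
  rw [skipWs]
  by_cases h1 : i < cs.length
  · simp [h1, h h1]
  · simp [h1]

theorem skipWs_stop (cs : List Char) (i : Nat) :
    skipWs cs i < cs.length → ∀ c, cs[skipWs cs i]? = some c → PySem.Chars.isspace c = false := by
  induction i using skipWs.induct cs with
  | case1 j h hc ih => rw [skipWs_succ cs j h hc]; exact ih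
  | case2 j h hc =>
    have he : skipWs cs j = j := by rw [skipWs]; simp [h, hc]
    rw [he]; intro _ c hsc
    rw [List.getElem?_eq_getElem h] at hsc
    cases hsc; simpa using hc
  | case3 j h =>
    have he : skipWs cs j = j := by rw [skipWs]; simp [h]
    rw [he]; intro hlt; omega

theorem readWordLoop_of_ge (cs : List Char) (i : Nat) (buf : List Char) (q : Option Char) (e : Bool)
    (h : ¬ i < cs.length) : readWordLoop cs i buf q e = (buf, i) := by
  rw [readWordLoop]; simp [h]

theorem loopA_of_ge (cs : List Char) (i : Nat) (q : Option Char) (e : Bool) (tg : List String)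
    (h : ¬ i < cs.length) : loopA cs i q e tg = tg := by
  rw [loopA]; simp [h]

-- the word emitted for a finished buffer
def emitE (buf : List Char) : List String := if buf ≠ [] then [String.ofList buf] else []

-- one step of B's loop, as an equation
theorem runB_cons (st : BState) (c : Char) (rest : List Char) (tg : List String) :
    runB st (c :: rest) tg = runB (stepB st tg c).1 rest (stepB st tg c).2 := rfl

-- B consumes a run of '>' exactly as A's run_end loop measures it
theorem gt_run (cs : List Char) : ∀ (n i w : Nat) (tg : List String), cs.length - i ≤ n →
    runB (.gt w) (cs.drop i) tg = runB (.gt (w + (runWhileGt cs i - i))) (cs.drop (runWhileGt cs i)) tg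
  | n, i, w, tg, hn => by
    by_cases h : i < cs.length
    · by_cases hc : cs[i] = '>'
      · have red := runWhileGt_succ cs i h hc
        have hge := runWhileGt_ge cs (i+1)
        rw [List.drop_eq_getElem_cons h, red, runB_cons]
        have hstep : stepB (.gt w) tg cs[i] = (.gt (w+1), tg) := by simp [stepB, hc]
        rw [hstep]
        match n with
        | 0 => omega
        | n+1 =>
          rw [gt_run cs n (i+1) (w+1) tg (by omega)]
          have harith : w + 1 + (runWhileGt cs (i+1) - (i+1)) = w + (runWhileGt cs (i+1) - i) := by omega
          rw [harith]
      · have he : runWhileGt cs i = i := by rw [runWhileGt]; simp [h, hc]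
        rw [he]; simp
    · have he : runWhileGt cs i = i := by rw [runWhileGt]; simp [h]
      rw [he]; simp

-- B's skip state consumes whitespace exactly as A's target_start loop
theorem ws_run (cs : List Char) : ∀ (n i : Nat) (tg : List String), cs.length - i ≤ n →
    runB .skip (cs.drop i) tg = runB .skip (cs.drop (skipWs cs i)) tg
  | n, i, tg, hn => by
    by_cases h : i < cs.length
    · by_cases hc : PySem.Chars.isspace cs[i] = true
      · have red := skipWs_succ cs i h hc
        rw [List.drop_eq_getElem_cons h, red, runB_cons]
        have hstep : stepB .skip tg cs[i] = (.skip, tg) := by simp [stepB, hc]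
        rw [hstep]
        match n with
        | 0 => omega
        | n+1 => exact ws_run cs n (i+1) tg (by omega)
      · rw [skipWs_eq_self cs i (fun _ => by simpa using hc)]
    · rw [skipWs_eq_self cs i (fun hlt => absurd hlt h)]

-- after a short run that is not followed by '=', B's gt state behaves like skip
theorem gt_to_skip (cs : List Char) (e w : Nat) (tg : List String) (hw : ¬ 2 < w)
    (hstop : ∀ _h : e < cs.length, cs[e] ≠ '>' ∧ cs[e] ≠ '=') :
    runB (.gt w) (cs.drop e) tg = runB .skip (cs.drop e) tg := by
  by_cases h : e < cs.length
  · obtain ⟨hgt, heq⟩ := hstop h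
    rw [List.drop_eq_getElem_cons h, runB_cons, runB_cons]
    have hstep : stepB (.gt w) tg cs[e] = stepB .skip tg cs[e] := by
      simp [stepB, hgt, heq, hw]
    rw [hstep]
  · rw [List.drop_of_length_le (by omega)]
    simp [runB]

-- B's word state tracks A's _read_shell_word loop
theorem word_run (cs : List Char) : ∀ (n i : Nat) (buf : List Char) (q : Option Char) (e : Bool) (tg : List String),
    cs.length - i ≤ n →
    runB (.word buf q e) (cs.drop i) tg =
      if _h : (readWordLoop cs i buf q e).2 < cs.length then
        runB (normalB (cs[(readWordLoop cs i buf q e).2])) (cs.drop ((readWordLoop cs i buf q e).2 + 1))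
          (tg ++ emitE (readWordLoop cs i buf q e).1)
      else tg ++ emitE (readWordLoop cs i buf q e).1
  | n, i, buf, q, e, tg, hn => by
    by_cases h : i < cs.length
    · have hrec : ∀ (buf' : List Char) (q' : Option Char) (e' : Bool) (tg' : List String),
          runB (.word buf' q' e') (cs.drop (i+1)) tg' =
            if _h : (readWordLoop cs (i+1) buf' q' e').2 < cs.length then
              runB (normalB (cs[(readWordLoop cs (i+1) buf' q' e').2]))
                (cs.drop ((readWordLoop cs (i+1) buf' q' e').2 + 1))
                (tg' ++ emitE (readWordLoop cs (i+1) buf' q' e').1)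
            else tg' ++ emitE (readWordLoop cs (i+1) buf' q' e').1 := by
        intro buf' q' e' tg'
        match n with
        | 0 => omega
        | n+1 => exact word_run cs n (i+1) buf' q' e' tg' (by omega)
      rw [List.drop_eq_getElem_cons h, runB_cons]
      by_cases he : e = true
      · have red : readWordLoop cs i buf q e = readWordLoop cs (i+1) (buf ++ [cs[i]]) q false := by
          rw [readWordLoop]; simp [h, he]
        have hwB : wordB buf q e cs[i] = (.word (buf ++ [cs[i]]) q false, []) := by
          simp [wordB, he]
        rw [red]
        have hstep : stepB (.word buf q e) tg cs[i] = (.word (buf ++ [cs[i]]) q false, tg) := by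
          simp [stepB, hwB]
        rw [hstep]; exact hrec _ _ _ _
      · by_cases hq : q.isSome = true
        · by_cases h1 : cs[i] = '\\' ∧ q = some '"'
          · have red : readWordLoop cs i buf q e = readWordLoop cs (i+1) buf q true := by
              rw [readWordLoop]; simp [h, he, h1]
            have hwB : wordB buf q e cs[i] = (.word buf q true, []) := by
              simp [wordB, he, h1]
            rw [red]
            have hstep : stepB (.word buf q e) tg cs[i] = (.word buf q true, tg) := by
              simp [stepB, hwB]
            rw [hstep]; exact hrec _ _ _ _
          · by_cases h2 : some cs[i] = q
            · have red : readWordLoop cs i buf q e = readWordLoop cs (i+1) buf none false := by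
                rw [readWordLoop]; simp [h, he, hq, h1, h2]
              have hwB : wordB buf q e cs[i] = (.word buf none false, []) := by
                simp [wordB, he, hq, h1, h2]
              rw [red]
              have hstep : stepB (.word buf q e) tg cs[i] = (.word buf none false, tg) := by
                simp [stepB, hwB]
              rw [hstep]; exact hrec _ _ _ _
            · have red : readWordLoop cs i buf q e = readWordLoop cs (i+1) (buf ++ [cs[i]]) q false := by
                rw [readWordLoop]; simp [h, he, hq, h1, h2]
              have hwB : wordB buf q e cs[i] = (.word (buf ++ [cs[i]]) q false, []) := by
                simp [wordB, he, hq, h1, h2]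
              rw [red]
              have hstep : stepB (.word buf q e) tg cs[i] = (.word (buf ++ [cs[i]]) q false, tg) := by
                simp [stepB, hwB]
              rw [hstep]; exact hrec _ _ _ _
        · by_cases h3 : cs[i] = '\\'
          · have red : readWordLoop cs i buf q e = readWordLoop cs (i+1) buf none true := by
              rw [readWordLoop]; simp [h, he, hq, h3]
            have hwB : wordB buf q e cs[i] = (.word buf none true, []) := by
              simp [wordB, he, hq, h3]
            rw [red]
            have hstep : stepB (.word buf q e) tg cs[i] = (.word buf none true, tg) := by
              simp [stepB, hwB]
            rw [hstep]; exact hrec _ _ _ _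
          · by_cases h4 : cs[i] = '\'' ∨ cs[i] = '"'
            · have red : readWordLoop cs i buf q e = readWordLoop cs (i+1) buf (some cs[i]) false := by
                rw [readWordLoop]; simp [h, he, hq, h3, h4]
              have hwB : wordB buf q e cs[i] = (.word buf (some cs[i]) false, []) := by
                simp [wordB, he, hq, h3, h4]
              rw [red]
              have hstep : stepB (.word buf q e) tg cs[i] = (.word buf (some cs[i]) false, tg) := by
                simp [stepB, hwB]
              rw [hstep]; exact hrec _ _ _ _
            · by_cases h5 : PySem.Chars.isspace cs[i] = true ∨ cs[i] ∈ [';', '|', '&', '<', '>', '(', ')']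
              · have red : readWordLoop cs i buf q e = (buf, i) := by
                  rw [readWordLoop]
                  rw [dif_pos h, if_neg he, if_neg hq, if_neg h3, if_neg h4, if_pos h5]
                have hwB : wordB buf q e cs[i] = (normalB cs[i], emitE buf) := by
                  unfold wordB
                  rw [if_neg he, if_neg hq, if_neg h3, if_neg h4, if_pos h5]
                  rfl
                rw [red]
                have hstep : stepB (.word buf q e) tg cs[i] = (normalB cs[i], tg ++ emitE buf) := by
                  simp [stepB, hwB]
                rw [hstep, dif_pos h]
              · have red : readWordLoop cs i buf q e = readWordLoop cs (i+1) (buf ++ [cs[i]]) q false := by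
                  rw [readWordLoop]
                  rw [dif_pos h, if_neg he, if_neg hq, if_neg h3, if_neg h4, if_neg h5]
                have hwB : wordB buf q e cs[i] = (.word (buf ++ [cs[i]]) q false, []) := by
                  unfold wordB
                  rw [if_neg he, if_neg hq, if_neg h3, if_neg h4, if_neg h5]
                rw [red]
                have hstep : stepB (.word buf q e) tg cs[i] = (.word (buf ++ [cs[i]]) q false, tg) := by
                  simp [stepB, hwB]
                rw [hstep]; exact hrec _ _ _ _
    · rw [readWordLoop_of_ge cs i buf q e h]
      rw [List.drop_of_length_le (by omega)]
      rw [dif_neg h]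
      simp [runB, emitE]
      split <;> simp

theorem loop_eq (cs : List Char) : ∀ (n i : Nat) (q : Option Char) (esc : Bool) (tg : List String),
    cs.length - i ≤ n → loopA cs i q esc tg = runB (.norm q esc) (cs.drop i) tg
  | n, i, q, esc, tg, hn => by
    by_cases h : i < cs.length
    · have hrec : ∀ (j : Nat) (q' : Option Char) (e' : Bool) (tg' : List String), i < j →
          loopA cs j q' e' tg' = runB (.norm q' e') (cs.drop j) tg' := by
        intro j q' e' tg' hj
        match n with
        | 0 => omega
        | n+1 => exact loop_eq cs n j q' e' tg' (by omega)
      rw [loopA, dif_pos h, List.drop_eq_getElem_cons h, runB_cons]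
      by_cases hesc : esc = true
      · rw [if_pos hesc]
        have hstep : stepB (.norm q esc) tg cs[i] = (.norm q false, tg) := by simp [stepB, hesc]
        rw [hstep]; exact hrec _ _ _ _ (by omega)
      · rw [if_neg hesc]
        by_cases hq : q.isSome = true
        · rw [if_pos hq]
          by_cases h1 : cs[i] = '\\' ∧ q = some '"'
          · rw [if_pos h1]
            have hstep : stepB (.norm q esc) tg cs[i] = (.norm q true, tg) := by
              simp [stepB, hesc, h1]
            rw [hstep]; exact hrec _ _ _ _ (by omega)
          · rw [if_neg h1]
            by_cases h2 : some cs[i] = q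
            · rw [if_pos h2]
              have hstep : stepB (.norm q esc) tg cs[i] = (.norm none false, tg) := by
                simp [stepB, hesc, hq, h1, h2]
              rw [hstep]; exact hrec _ _ _ _ (by omega)
            · rw [if_neg h2]
              have hstep : stepB (.norm q esc) tg cs[i] = (.norm q false, tg) := by
                simp [stepB, hesc, hq, h1, h2]
              rw [hstep]; exact hrec _ _ _ _ (by omega)
        · rw [if_neg hq]
          have hqn : q = none := Option.not_isSome_iff_eq_none.mp (by simpa using hq)
          have hescf : esc = false := by simpa using hesc
          by_cases h3 : cs[i] = '\\'
          · rw [if_pos h3]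
            have hstep : stepB (.norm q esc) tg cs[i] = (.norm none true, tg) := by
              simp [stepB, normalB, hesc, hq, h3]
            rw [hstep, hqn]; exact hrec _ _ _ _ (by omega)
          · rw [if_neg h3]
            by_cases h4 : cs[i] = '\'' ∨ cs[i] = '"'
            · rw [if_pos h4]
              have hstep : stepB (.norm q esc) tg cs[i] = (.norm (some cs[i]) false, tg) := by
                rcases h4 with h4 | h4 <;> simp [stepB, normalB, hesc, hq, h4]
              rw [hstep]; exact hrec _ _ _ _ (by omega)
            · rw [if_neg h4]
              by_cases h5 : cs[i] ≠ '>'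
              · rw [dif_pos h5]
                have hstep : stepB (.norm q esc) tg cs[i] = (.norm none false, tg) := by
                  simp [stepB, normalB, hesc, hq, h3, h4, h5]
                rw [hstep, hqn, hescf]; exact hrec _ _ _ _ (by omega)
              · rw [dif_neg h5]
                have hc : cs[i] = '>' := not_not.mp h5
                have hstep : stepB (.norm q esc) tg cs[i] = (.gt 1, tg) := by
                  simp [stepB, normalB, hesc, hq, hc]
                rw [hstep]
                -- consume the rest of the '>' run on B's side
                have hruneq := runWhileGt_succ cs i h hc
                have hlt : i < runWhileGt cs i := runWhileGt_lt_of cs i h hc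
                have hge1 : i + 1 ≤ runWhileGt cs (i+1) := hruneq ▸ hlt
                rw [gt_run cs cs.length (i+1) 1 tg (by omega), ← hruneq]
                have harith : 1 + (runWhileGt cs i - (i+1)) = runWhileGt cs i - i := by omega
                rw [harith]
                set eend := runWhileGt cs i with heend
                -- A's next_char and run-width test
                by_cases hel : eend < cs.length
                · have hstopgt : cs[eend] ≠ '>' := by
                    have := runWhileGt_stop cs i
                    rw [← heend] at this
                    intro hx
                    exact this hel (by rw [List.getElem?_eq_getElem hel, hx])
                  have hnext : (if hr : eend < cs.length then some (cs[eend]'hr) else none) = some cs[eend] := dif_pos hel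
                  rw [hnext]
                  by_cases hwide : 2 < eend - i ∨ cs[eend] = '='
                  · have hcond : 2 < eend - i ∨ some cs[eend] = some '=' := by
                      rcases hwide with hw | hw
                      · exact Or.inl hw
                      · exact Or.inr (by rw [hw])
                    rw [if_pos hcond]
                    have hstep2 : runB (.gt (eend - i)) (cs.drop eend) tg
                        = runB (normalB cs[eend]) (cs.drop (eend+1)) tg := by
                      rw [List.drop_eq_getElem_cons hel, runB_cons]
                      have : stepB (.gt (eend - i)) tg cs[eend] = (normalB cs[eend], tg) := by
                        simp only [stepB, if_neg hstopgt]
                        rw [if_pos hwide]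
                      rw [this]
                    have hfold : runB (.norm none false) (cs.drop eend) tg
                        = runB (normalB cs[eend]) (cs.drop (eend+1)) tg := by
                      rw [List.drop_eq_getElem_cons hel, runB_cons]; rfl
                    rw [hstep2, ← hfold, hqn, hescf]
                    exact hrec _ _ _ _ hlt
                  · have hw1 : ¬ 2 < eend - i := fun hx => hwide (Or.inl hx)
                    have hw2 : cs[eend] ≠ '=' := fun hx => hwide (Or.inr hx)
                    have hcond : ¬ (2 < eend - i ∨ some cs[eend] = some '=') := by
                      rintro (hx | hx)
                      · exact hw1 hx
                      · exact hw2 (by injection hx)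
                    rw [if_neg hcond]
                    -- B: gt behaves like skip from eend on
                    rw [gt_to_skip cs eend (eend - i) tg hw1 (fun _ => ⟨hstopgt, hw2⟩)]
                    rw [ws_run cs cs.length eend tg (by omega)]
                    set t := skipWs cs eend with ht
                    have htge : eend ≤ t := skipWs_ge cs eend
                    by_cases htl : t < cs.length
                    · have htstop : PySem.Chars.isspace cs[t] = false := by
                        have := skipWs_stop cs eend
                        rw [← ht] at this
                        exact this htl cs[t] (List.getElem?_eq_getElem htl)
                      by_cases hamp : cs[t] = '&'
                      · have hcond2 : t < cs.length ∧ cs[t]? = some '&' :=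
                          ⟨htl, by rw [List.getElem?_eq_getElem htl, hamp]⟩
                        rw [dif_pos hcond2]
                        have hstep3 : runB .skip (cs.drop t) tg = runB (.norm none false) (cs.drop (t+1)) tg := by
                          rw [List.drop_eq_getElem_cons htl, runB_cons]
                          have : stepB .skip tg cs[t] = (.norm none false, tg) := by
                            simp [stepB, hamp, show PySem.Chars.isspace '&' = false from by decide]
                          rw [this]
                        rw [hstep3, hqn, hescf]
                        exact hrec _ _ _ _ (by omega)
                      · have hcond2 : ¬ (t < cs.length ∧ cs[t]? = some '&') := by
                          rintro ⟨_, hx⟩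
                          rw [List.getElem?_eq_getElem htl] at hx
                          exact hamp (by injection hx)
                        rw [dif_neg hcond2]
                        set r := readWordLoop cs t [] none false with hr
                        -- A reads the target word at t; B enters the word state
                        have hword : read_shell_word cs t = r := by
                          rw [hr]
                          unfold read_shell_word
                          rw [skipWs_eq_self cs t (fun _ => htstop)]
                        have hstep3 : runB .skip (cs.drop t) tg = runB (.word [] none false) (cs.drop t) tg := by
                          rw [List.drop_eq_getElem_cons htl, runB_cons, runB_cons]
                          have : stepB .skip tg cs[t] = stepB (.word [] none false) tg cs[t] := by
                            simp [stepB, wordB, htstop, hamp]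
                          rw [this]
                        rw [hstep3, word_run cs cs.length t [] none false tg (by omega)]
                        have hrge : t ≤ r.2 := by
                          rw [hr]; exact readWordLoop_ge cs cs.length t [] none false (by omega)
                        have hloopA : (if r.1 ≠ [] then loopA cs r.2 q esc (tg ++ [String.ofList r.1])
                            else loopA cs r.2 q esc tg) = loopA cs r.2 q esc (tg ++ emitE r.1) := by
                          unfold emitE
                          by_cases hb : r.1 ≠ [] <;> simp [hb]
                        rw [hword, hloopA, hqn, hescf]
                        by_cases hrl : r.2 < cs.length
                        · rw [dif_pos hrl]
                          have hfold : runB (.norm none false) (cs.drop r.2) (tg ++ emitE r.1)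
                              = runB (normalB cs[r.2]) (cs.drop (r.2+1)) (tg ++ emitE r.1) := by
                            rw [List.drop_eq_getElem_cons hrl, runB_cons]; rfl
                          rw [← hfold]
                          exact hrec _ _ _ _ (by omega)
                        · rw [dif_neg hrl]
                          exact loopA_of_ge cs r.2 none false _ hrl
                    · -- whitespace runs to the end of the command: nothing is appended
                      rw [List.drop_of_length_le (l := cs) (i := t) (by omega)]
                      have hcond2 : ¬ (t < cs.length ∧ cs[t]? = some '&') := fun hx => htl hx.1
                      rw [dif_neg hcond2]
                      have hword : read_shell_word cs t = ([], t) := by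
                        unfold read_shell_word
                        rw [skipWs_eq_self cs t (fun hlt' => absurd hlt' htl)]
                        exact readWordLoop_of_ge cs t [] none false htl
                      rw [hword]
                      simp only [ne_eq, not_true_eq_false, if_false]
                      rw [loopA_of_ge cs t q esc tg htl]
                      simp [runB]
                · -- the '>' run reaches the end of the command
                  rw [List.drop_of_length_le (l := cs) (i := eend) (by omega)]
                  have hnext : (if hr : eend < cs.length then some (cs[eend]'hr) else none) = none := dif_neg hel
                  rw [hnext]
                  by_cases hwide : 2 < eend - i
                  · rw [if_pos (Or.inl hwide)]
                    rw [loopA_of_ge cs eend q esc tg hel]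
                    simp [runB]
                  · have hcond : ¬ (2 < eend - i ∨ (none : Option Char) = some '=') := by
                      rintro (hx | hx)
                      · exact hwide hx
                      · simp at hx
                    rw [if_neg hcond]
                    have hts : skipWs cs eend = eend := skipWs_eq_self cs eend (fun hlt => absurd hlt hel)
                    rw [hts]
                    have hcond2 : ¬ (eend < cs.length ∧ cs[eend]? = some '&') := fun hx => hel hx.1
                    rw [dif_neg hcond2]
                    have hword : read_shell_word cs eend = ([], eend) := by
                      unfold read_shell_word
                      rw [hts]
                      exact readWordLoop_of_ge cs eend [] none false hel
                    rw [hword]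
                    simp only [ne_eq, not_true_eq_false, if_false]
                    rw [loopA_of_ge cs eend q esc tg hel]
                    simp [runB]
    · rw [loopA_of_ge cs i q esc tg h, List.drop_of_length_le (by omega)]
      simp [runB]

-- ===== VERDICT (by name: the statement is the Claim_ definition above) =====
theorem shell_redirection_targets_py_spec : Claim_equal_shell_redirection_targets_py := by
  intro command _
  unfold Spec_shell_redirection_targets_py shell_redirection_targets_py shell_redirection_targets_py_alt
  simpa using loop_eq command.toList command.toList.length 0 none false [] (by omega)
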